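-- pv_equiv track=rewrite | github.com/wf-TRs/TRMotifAnnotator | TRMotifAnnotator.py | post_process_repeat_structure
-- ===== SOURCE A (Python) =====
-- def post_process_repeat_structure(repeat_structure: str, non_canonical_motifs: str) -> str:
--     """Post process repeat structures to consolidate non-canonical motifs better and compress homopolymers."""
--     elements = repeat_structure.split('-')
--     combined = []
--     current_motif = ''
--     count = 0
--
--     for element in elements:
--         # Check if element is a homopolymer (all same base) with length > 1
--         if element and len(element) > 1 and len(set(element)) == 1 and element[0] in "ACGT":
--             # Convert homopolymer to compressed format (only if more than 1 base)
--             element = f"({element[0]}){len(element)}"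
--
--         if element == current_motif:
--             count += 1
--         else:
--             if count > 0:
--                 combined.append(f"({current_motif}){count}" if count > 1 else current_motif)
--             current_motif = element
--             count = 1
--
--     if count > 0:
--         combined.append(f"({current_motif}){count}" if count > 1 else current_motif)
--
--     return '-'.join(combined)
-- ===== SOURCE B (Python) =====
-- def post_process_repeat_structure(repeat_structure: str, non_canonical_motifs: str) -> str:
--     def compress(e):
--         # homopolymer (length > 1, one repeated ACGT base) -> "(X)n"
--         return f"({e[0]}){len(e)}" if len(e) > 1 and e[0] in "ACGT" and e == e[0] * len(e) else e
--
--     ts = [compress(e) for e in repeat_structure.split('-')]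
--     # cut positions: 0, every index where the motif changes, and the end
--     cuts = [0] + [k + 1 for k, (x, y) in enumerate(zip(ts, ts[1:])) if x != y] + [len(ts)]
--     return '-'.join(
--         f"({ts[s]}){t - s}" if t - s > 1 else ts[s]
--         for s, t in zip(cuts, cuts[1:]))
-- ===== Notes on version B (the rewrite author's own statement) =====
-- stated objective: alternative
-- what changed: A interleaves the homopolymer rewrite with a running current-motif/counter state machine flushed at the end; B compresses all elements first, then computes the list of cut positions (every index where adjacent elements differ) via enumerate over zipped neighbour pairs, and formats each segment between consecutive cut positions by index arithmetic -- no carried motif/counter state and no run scanning.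
import Mathlib
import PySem

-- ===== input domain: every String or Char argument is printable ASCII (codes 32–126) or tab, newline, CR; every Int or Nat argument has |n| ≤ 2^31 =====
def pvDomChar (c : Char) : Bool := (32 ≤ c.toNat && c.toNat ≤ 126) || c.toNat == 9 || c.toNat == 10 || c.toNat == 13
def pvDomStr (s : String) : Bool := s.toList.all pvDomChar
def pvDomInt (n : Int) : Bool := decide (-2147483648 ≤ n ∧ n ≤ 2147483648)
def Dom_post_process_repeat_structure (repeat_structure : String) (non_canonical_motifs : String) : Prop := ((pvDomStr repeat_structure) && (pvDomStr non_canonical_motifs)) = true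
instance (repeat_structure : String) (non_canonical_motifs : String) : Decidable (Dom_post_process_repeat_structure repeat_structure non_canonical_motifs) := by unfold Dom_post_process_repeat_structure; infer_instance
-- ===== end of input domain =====

-- B replaces A's running current-motif/counter state machine by a cut-position computation:
-- compress each element, mark every index where adjacent elements differ, and format the
-- segments between consecutive cut positions by index arithmetic; objective: alternative.

-- ===== PORT A =====
-- homopolymer check+rewrite of one element (the first `if` in A's loop body)
def ppA_transform : List Char → List Char
  | [] => []
  | c :: rest =>
    if 1 < (c :: rest).length ∧ (PySem.Set.ofList (c :: rest)).length = 1 ∧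
        PySem.Chars.isIn [c] ['A', 'C', 'G', 'T'] = true then
      ['(', c, ')'] ++ PySem.Int.toChars ((c :: rest).length : Int)
    else c :: rest

-- f"({current_motif}){count}" if count > 1 else current_motif
def ppA_fmt (m : List Char) (n : Nat) : List Char :=
  if 1 < n then ['('] ++ m ++ [')'] ++ PySem.Int.toChars (n : Int) else m

-- one iteration of A's for-loop; state = (combined, current_motif, count)
def ppA_step (st : List (List Char) × List Char × Nat) (element : List Char) :
    List (List Char) × List Char × Nat :=
  let e := ppA_transform element
  if e = st.2.1 then (st.1, st.2.1, st.2.2 + 1)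
  else if 0 < st.2.2 then (st.1 ++ [ppA_fmt st.2.1 st.2.2], e, 1)
  else (st.1, e, 1)

def post_process_repeat_structure (repeat_structure : String) (non_canonical_motifs : String) : String :=
  let elements := PySem.Chars.splitOn repeat_structure.toList ['-']
  let st := elements.foldl ppA_step ([], [], 0)
  let combined := if 0 < st.2.2 then st.1 ++ [ppA_fmt st.2.1 st.2.2] else st.1
  String.mk (PySem.Chars.join ['-'] combined)

-- ===== PORT B =====
-- compress(e): "(X)n" if len(e)>1 and e[0] in "ACGT" and e == e[0]*len(e) else e
def ppB_compress (e : List Char) : List Char :=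
  if 1 < e.length ∧ PySem.Chars.isIn [e.headI] ['A', 'C', 'G', 'T'] = true ∧
      e = List.replicate e.length e.headI then
    ['(', e.headI, ')'] ++ PySem.Int.toChars ((e.length : Int))
  else e

-- f"({ts[s]}){t-s}" if t-s > 1 else ts[s]
def ppB_fmt (m : List Char) (n : Nat) : List Char :=
  if 1 < n then ['('] ++ m ++ [')'] ++ PySem.Int.toChars (n : Int) else m

-- cuts = [0] + [k+1 for k,(x,y) in enumerate(zip(ts, ts[1:])) if x != y] + [len(ts)]
-- (enumerate indices are nonnegative, carried as Nat)
def ppB_cuts (ts : List (List Char)) : List Nat :=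
  0 :: ((PySem.List.enumerate (ts.zip (ts.drop 1))).filter
      (fun p => p.2.1 ≠ p.2.2)).map (fun p => p.1.toNat + 1) ++ [ts.length]

-- the joined generator: one formatted segment per consecutive pair of cuts
def ppB_parts (ts : List (List Char)) (cuts : List Nat) : List (List Char) :=
  (cuts.zip (cuts.drop 1)).map (fun p => ppB_fmt (ts.getD p.1 []) (p.2 - p.1))

def post_process_repeat_structure_alt (repeat_structure : String) (non_canonical_motifs : String) : String :=
  let ts := (PySem.Chars.splitOn repeat_structure.toList ['-']).map ppB_compress
  String.mk (PySem.Chars.join ['-'] (ppB_parts ts (ppB_cuts ts)))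

-- ===== PRECONDITION & SPEC =====
def Spec_post_process_repeat_structure (repeat_structure : String) (non_canonical_motifs : String) (out : String) : Prop := out = post_process_repeat_structure_alt repeat_structure non_canonical_motifs
instance (repeat_structure : String) (non_canonical_motifs : String) (out : String) : Decidable (Spec_post_process_repeat_structure repeat_structure non_canonical_motifs out) := by unfold Spec_post_process_repeat_structure; infer_instance

-- ===== CLAIM (what is proved, stated in full; the proofs are below) =====
def Claim_equal_post_process_repeat_structure : Prop := ∀ (repeat_structure : String) (non_canonical_motifs : String), Dom_post_process_repeat_structure repeat_structure non_canonical_motifs → Spec_post_process_repeat_structure repeat_structure non_canonical_motifs (post_process_repeat_structure repeat_structure non_canonical_motifs)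

-- ===== LEMMAS AND PROOFS =====

-- A's loop step with the element already transformed
def ppCore (st : List (List Char) × List Char × Nat) (e : List Char) :
    List (List Char) × List Char × Nat :=
  if e = st.2.1 then (st.1, st.2.1, st.2.2 + 1)
  else if 0 < st.2.2 then (st.1 ++ [ppB_fmt st.2.1 st.2.2], e, 1)
  else (st.1, e, 1)

-- the final flush after A's loop
def ppFinish (st : List (List Char) × List Char × Nat) : List (List Char) :=
  if 0 < st.2.2 then st.1 ++ [ppB_fmt st.2.1 st.2.2] else st.1

-- canonical run-length encoding, the meeting point of both proofs
def ppScan (t : List Char) : List (List Char) → Nat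
  | [] => 0
  | u :: us => if u = t then ppScan t us + 1 else 0

def ppEmitAux : Nat → List (List Char) → List (List Char)
  | _, [] => []
  | 0, _ :: _ => []
  | fuel + 1, t :: ts =>
    let n := ppScan t ts + 1
    ppB_fmt t n :: ppEmitAux fuel (ts.drop (n - 1))

def ppEmit (ts : List (List Char)) : List (List Char) :=
  ppEmitAux ts.length ts

-- recursive characterization of the cut positions (offset o)
def ppD (o : Nat) : List (List Char) → List Nat
  | x :: y :: r => (if x ≠ y then [o + 1] else []) ++ ppD (o + 1) (y :: r)
  | _ => []

theorem ofList_all_eq {c : Char} {l : List Char} (h : ∀ x ∈ l, x = c) :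
    List.foldl PySem.Set.add [c] l = [c] := by
  induction l with
  | nil => rfl
  | cons x xs ih =>
    have hx : x = c := h x (by simp)
    have hxs : ∀ y ∈ xs, y = c := fun y hy => h y (by simp [hy])
    simp [hx, PySem.Set.add, PySem.Set.contains, ih hxs]

theorem set_len_one_iff (c : Char) (rest : List Char) :
    (PySem.Set.ofList (c :: rest)).length = 1 ↔ (c :: rest).count c = (c :: rest).length := by
  rw [List.count_eq_length]
  constructor
  · intro h
    obtain ⟨y, hy⟩ := List.length_eq_one_iff.mp h
    have hc : c = y := by
      have := (PySem.Set.mem_ofList (c :: rest) c).mpr (by simp)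
      rw [hy] at this; simpa using this
    intro b hb
    have hb' := (PySem.Set.mem_ofList (c :: rest) b).mpr hb
    rw [hy] at hb'; simp at hb'
    rw [hb']; exact hc
  · intro h
    have hall : ∀ x ∈ rest, x = c := fun x hx => ((h x (by simp [hx]))).symm
    have h0 : PySem.Set.ofList (c :: rest) = List.foldl PySem.Set.add [c] rest := rfl
    rw [h0, ofList_all_eq hall]; rfl

theorem transform_eq (e : List Char) : ppA_transform e = ppB_compress e := by
  cases e with
  | nil => simp [ppA_transform, ppB_compress]
  | cons c rest =>
    have hiff : ((PySem.Set.ofList (c :: rest)).length = 1 ∧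
        PySem.Chars.isIn [c] ['A', 'C', 'G', 'T'] = true) ↔
        (PySem.Chars.isIn [c] ['A', 'C', 'G', 'T'] = true ∧
          c :: rest = List.replicate (c :: rest).length c) := by
      rw [set_len_one_iff, List.count_eq_length, List.eq_replicate_iff]
      constructor
      · rintro ⟨h1, h2⟩
        exact ⟨h2, rfl, fun b hb => (h1 b hb).symm⟩
      · rintro ⟨h2, _, h1⟩
        exact ⟨fun b hb => (h1 b hb).symm, h2⟩
    simp only [ppA_transform, ppB_compress, List.headI]
    exact if_congr (and_congr Iff.rfl hiff) rfl rfl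

theorem emitAux_eq_of_le (f : Nat) : ∀ (g : Nat) (ts : List (List Char)),
    ts.length ≤ f → ts.length ≤ g → ppEmitAux f ts = ppEmitAux g ts := by
  induction f with
  | zero =>
    intro g ts hf _
    have : ts = [] := List.eq_nil_of_length_eq_zero (by omega)
    subst this; cases g <;> rfl
  | succ f ih =>
    intro g ts hf hg
    cases ts with
    | nil => cases g <;> rfl
    | cons t ts =>
      cases g with
      | zero => simp at hg
      | succ g =>
        simp only [ppEmitAux]
        refine congrArg _ (ih g (ts.drop (ppScan t ts + 1 - 1)) ?_ ?_) <;>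
          simp only [List.length_drop] <;> simp at hf hg <;> omega

theorem emit_cons (t : List Char) (ts : List (List Char)) :
    ppEmit (t :: ts)
      = ppB_fmt t (ppScan t ts + 1) :: ppEmit (ts.drop (ppScan t ts)) := by
  simp only [ppEmit, List.length_cons, ppEmitAux, Nat.add_sub_cancel]
  refine congrArg _ (emitAux_eq_of_le ts.length _ _ ?_ ?_) <;>
    simp only [List.length_drop] <;> omega

theorem rle (ts : List (List Char)) (cur : List Char) (n : Nat) (acc : List (List Char))
    (h : 0 < n) :
    ppFinish (ts.foldl ppCore (acc, cur, n))
    = acc ++ ppB_fmt cur (n + ppScan cur ts) :: ppEmit (ts.drop (ppScan cur ts)) := by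
  induction ts generalizing cur n acc with
  | nil => simp [ppFinish, ppScan, ppEmit, ppEmitAux, h]
  | cons t ts ih =>
    by_cases hct : t = cur
    · subst hct
      rw [List.foldl_cons, show ppCore (acc, t, n) t = (acc, t, n + 1) from by simp [ppCore]]
      rw [ih t (n + 1) acc (by omega)]
      have hs : ppScan t (t :: ts) = ppScan t ts + 1 := by simp [ppScan]
      rw [hs, List.drop_succ_cons, show n + (ppScan t ts + 1) = n + 1 + ppScan t ts from by omega]
    · rw [List.foldl_cons,
        show ppCore (acc, cur, n) t = (acc ++ [ppB_fmt cur n], t, 1) from by simp [ppCore, hct, h]]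
      rw [ih t 1 (acc ++ [ppB_fmt cur n]) (by omega)]
      have hs : ppScan cur (t :: ts) = 0 := by simp [ppScan, hct]
      rw [hs, List.drop_zero, Nat.add_zero, emit_cons]
      simp [Nat.add_comm]

-- ppScan never overshoots
theorem scan_le (t : List Char) (l : List (List Char)) : ppScan t l ≤ l.length := by
  induction l with
  | nil => simp [ppScan]
  | cons u us ih => by_cases h : u = t <;> simp [ppScan, h] <;> omega

-- the port's enumerate/filter/map pipeline computes ppD
theorem enum_eq_ppD (ts : List (List Char)) : ∀ (o : Nat),
    ((PySem.List.enumerate (ts.zip (ts.drop 1)) (o : Int)).filter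
        (fun p => p.2.1 ≠ p.2.2)).map (fun p => p.1.toNat + 1) = ppD o ts := by
  induction ts with
  | nil => intro o; rfl
  | cons x rest ih =>
    intro o
    cases rest with
    | nil => rfl
    | cons y r =>
      have ih' := ih (o + 1)
      rw [show (y :: r).drop 1 = r from rfl] at ih'
      rw [show ((o + 1 : Nat) : Int) = (o : Int) + 1 from by push_cast; ring] at ih'
      have hz : (x :: y :: r).zip ((x :: y :: r).drop 1) = (x, y) :: (y :: r).zip r := rfl
      rw [hz, PySem.List.enumerate_cons]
      by_cases hxy : x = y
      · rw [List.filter_cons_of_neg (by simp [hxy]), ih']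
        simp [ppD, hxy]
      · rw [List.filter_cons_of_pos (by simp [hxy]), List.map_cons, ih']
        simp [ppD, hxy, Int.toNat_natCast]

theorem ppD_shift (ts : List (List Char)) : ∀ (o : Nat),
    ppD o ts = (ppD 0 ts).map (· + o) := by
  induction ts with
  | nil => intro o; rfl
  | cons x rest ih =>
    intro o
    cases rest with
    | nil => rfl
    | cons y r =>
      simp only [ppD]
      rw [ih (o + 1), ih 1, List.map_append, List.map_map]
      by_cases hxy : x = y <;>
        simp [hxy, Function.comp, Nat.add_comm, Nat.add_left_comm]

-- run decomposition of the cut list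
theorem ppD_run (rest : List (List Char)) : ∀ (t : List Char),
    ppD 0 (t :: rest)
      = if rest.drop (ppScan t rest) = [] then []
        else (ppScan t rest + 1)
          :: (ppD 0 (rest.drop (ppScan t rest))).map (· + (ppScan t rest + 1)) := by
  induction rest with
  | nil => intro t; rfl
  | cons y rs ih =>
    intro t
    by_cases hyt : y = t
    · subst hyt
      have hsc : ppScan y (y :: rs) = ppScan y rs + 1 := by simp [ppScan]
      have h0 : ppD 0 (y :: y :: rs) = (ppD 0 (y :: rs)).map (· + 1) := by
        simp [ppD, ppD_shift (y :: rs) 1]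
      rw [h0, ih y, hsc, List.drop_succ_cons]
      by_cases hnil : rs.drop (ppScan y rs) = []
      · simp [hnil]
      · rw [if_neg hnil, if_neg hnil, List.map_cons, List.map_map]
        refine congrArg₂ List.cons (by omega) (List.map_congr_left fun a _ => ?_)
        simp [Function.comp]; omega
    · have hsc : ppScan t (y :: rs) = 0 := by simp [ppScan, hyt]
      have h0 : ppD 0 (t :: y :: rs) = 1 :: (ppD 0 (y :: rs)).map (· + 1) := by
        simp [ppD, (Ne.symm hyt : ¬ t = y), ppD_shift (y :: rs) 1]
      rw [h0, hsc]
      simp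

theorem parts_cons (ts : List (List Char)) (a b : Nat) (l : List Nat) :
    ppB_parts ts (a :: b :: l)
      = ppB_fmt (ts.getD a []) (b - a) :: ppB_parts ts (b :: l) := rfl

theorem parts_shift (ts : List (List Char)) (n : Nat) : ∀ (cuts : List Nat),
    ppB_parts ts (cuts.map (· + n)) = ppB_parts (ts.drop n) cuts := by
  intro cuts
  induction cuts with
  | nil => rfl
  | cons a l ih =>
    cases l with
    | nil => rfl
    | cons b l' =>
      rw [show (a :: b :: l').map (· + n) = (a + n) :: (b + n) :: l'.map (· + n) from rfl,
        parts_cons, show ((b + n) :: l'.map (· + n)) = (b :: l').map (· + n) from rfl, ih,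
        parts_cons]
      refine congrArg₂ _ ?_ rfl
      have hget : ts.getD (a + n) [] = (ts.drop n).getD a [] := by
        simp [List.getD_eq_getElem?_getD, List.getElem?_drop, Nat.add_comm]
      rw [hget]
      refine congrArg _ (by omega)

-- the cut-pair pipeline is run-length encoding (for the nonempty lists split produces)
theorem parts_eq_emit (N : Nat) : ∀ (t : List Char) (rest : List (List Char)),
    rest.length ≤ N → ppB_parts (t :: rest) (ppB_cuts (t :: rest)) = ppEmit (t :: rest) := by
  induction N with
  | zero =>
    intro t rest hN
    have : rest = [] := List.eq_nil_of_length_eq_zero (by omega)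
    subst this; rfl
  | succ N ih =>
    intro t rest hN
    have hcuts : ppB_cuts (t :: rest) = 0 :: ppD 0 (t :: rest) ++ [(t :: rest).length] := by
      simp only [ppB_cuts]
      rw [show (0 : Int) = ((0 : Nat) : Int) from rfl, enum_eq_ppD (t :: rest) 0]
    set s := ppScan t rest with hs
    have hslen := scan_le t rest
    by_cases hnil : rest.drop s = []
    · have hlen : rest.length = s := by
        have := congrArg List.length hnil
        simp only [List.length_drop, List.length_nil] at this; omega
      rw [hcuts, ppD_run rest t, ← hs, if_pos hnil]
      rw [emit_cons, ← hs, hnil]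
      simp only [List.length_cons, hlen]
      rfl
    · rw [hcuts, ppD_run rest t, ← hs, if_neg hnil]
      have hlen : (t :: rest).length = (rest.drop s).length + (s + 1) := by
        simp only [List.length_cons, List.length_drop]; omega
      obtain ⟨u, us, hru⟩ : ∃ u us, rest.drop s = u :: us :=
        match h : rest.drop s with
        | [] => absurd h hnil
        | u :: us => ⟨u, us, rfl⟩
      simp only [List.cons_append]
      rw [parts_cons]
      have htail : (s + 1) :: ((ppD 0 (rest.drop s)).map (· + (s + 1)) ++ [(t :: rest).length])
          = (0 :: (ppD 0 (rest.drop s)) ++ [(rest.drop s).length]).map (· + (s + 1)) := by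
        simp [hlen]
      rw [htail, parts_shift]
      have hdrop : (t :: rest).drop (s + 1) = rest.drop s := by simp
      rw [hdrop]
      have hcutsR : 0 :: ppD 0 (rest.drop s) ++ [(rest.drop s).length]
          = ppB_cuts (rest.drop s) := by
        simp only [ppB_cuts]
        rw [show (0 : Int) = ((0 : Nat) : Int) from rfl, enum_eq_ppD (rest.drop s) 0]
      rw [hcutsR, hru, ih u us (by
        have := congrArg List.length hru
        simp only [List.length_drop, List.length_cons] at this
        omega)]
      conv_rhs => rw [emit_cons, hru, emit_cons]
      simp
      exact ⟨rfl, emit_cons u us⟩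

-- ===== VERDICT (by name: the statement is the Claim_ definition above) =====
theorem post_process_repeat_structure_spec : Claim_equal_post_process_repeat_structure := by
  intro rs ncm _hdom
  unfold Spec_post_process_repeat_structure
  simp only [post_process_repeat_structure, post_process_repeat_structure_alt]
  refine congrArg String.mk ?_
  have hmap : (PySem.Chars.splitOn rs.toList ['-']).map ppB_compress
      = (PySem.Chars.splitOn rs.toList ['-']).map ppA_transform :=
    List.map_congr_left fun e _ => (transform_eq e).symm
  have hf : (PySem.Chars.splitOn rs.toList ['-']).foldl ppA_step ([], [], 0)
      = ((PySem.Chars.splitOn rs.toList ['-']).map ppA_transform).foldl ppCore ([], [], 0) := by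
    rw [List.foldl_map]; rfl
  rw [hmap, hf]
  show PySem.Chars.join ['-']
      (ppFinish (((PySem.Chars.splitOn rs.toList ['-']).map ppA_transform).foldl ppCore ([], [], 0)))
    = PySem.Chars.join ['-']
      (ppB_parts ((PySem.Chars.splitOn rs.toList ['-']).map ppA_transform)
        (ppB_cuts ((PySem.Chars.splitOn rs.toList ['-']).map ppA_transform)))
  generalize (PySem.Chars.splitOn rs.toList ['-']).map ppA_transform = L
  cases L with
  | nil => rfl
  | cons t ts =>
    rw [parts_eq_emit ts.length t ts le_rfl]
    refine congrArg _ ?_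
    have hfirst : ppCore ([], [], 0) t = ([], t, 1) := by
      by_cases ht : t = ([] : List Char) <;> simp [ppCore, ht]
    rw [List.foldl_cons, hfirst, rle ts t 1 [] (by omega), emit_cons]
    simp [Nat.add_comm]
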